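-- pv_equiv track=rewrite | github.com/kesavan-t-dev/Python | tasks/Day_6&7/remove_mid_element.py | remove_middle
-- ===== SOURCE A (Python) =====
-- def remove_middle(arr):
--     if not arr:
--         return []
--
--     length = 0
--
--     for _ in arr:
--         length += 1
--
--
--     if length % 2 == 1:
--         mid1 = length // 2
--         mid2 = mid1
--     else:
--         mid1 = length // 2 - 1
--         mid2 = length // 2
--
--     new_arr = []
--     index = 0
--     for item in arr:
--         if not (mid1 <= index <= mid2):
--             new_arr.append(item)
--         index += 1
--
--     return new_arr
-- ===== SOURCE B (Python) =====
-- def remove_middle(arr):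
--     n = len(arr)
--     return arr[:(n - 1) // 2] + arr[n // 2 + 1:]
-- ===== Notes on version B (the rewrite author's own statement) =====
-- stated objective: simpler
-- what changed: Replaces the manual element-counting loop and the per-element index-filter loop with len() and two contiguous slices arr[:(n-1)//2] + arr[n//2+1:], a closed-form expression with no Python-level loops.
import Mathlib
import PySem

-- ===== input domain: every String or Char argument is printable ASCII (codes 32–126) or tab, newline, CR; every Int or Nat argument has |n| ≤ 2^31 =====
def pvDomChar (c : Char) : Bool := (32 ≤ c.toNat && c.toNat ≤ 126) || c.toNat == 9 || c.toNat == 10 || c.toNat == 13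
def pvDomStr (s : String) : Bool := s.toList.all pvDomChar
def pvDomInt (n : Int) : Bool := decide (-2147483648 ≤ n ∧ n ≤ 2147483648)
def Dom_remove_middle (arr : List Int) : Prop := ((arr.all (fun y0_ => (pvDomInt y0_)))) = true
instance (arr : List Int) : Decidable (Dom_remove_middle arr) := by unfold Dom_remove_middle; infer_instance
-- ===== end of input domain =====

-- ===== PORT A =====
-- literal transliteration: count the length by a loop, compute mid1/mid2,
-- then rebuild the list item by item skipping indices in [mid1, mid2]
def remove_middle (arr : List Int) : List Int :=
  if arr = [] then []
  else
    let length : Int := arr.foldl (fun l _ => l + 1) 0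
    let p : Int × Int :=
      if PySem.Int.mod length 2 = 1 then
        (PySem.Int.floordiv length 2, PySem.Int.floordiv length 2)
      else
        (PySem.Int.floordiv length 2 - 1, PySem.Int.floordiv length 2)
    let mid1 := p.1
    let mid2 := p.2
    let st : List Int × Int :=
      arr.foldl (fun st item =>
        if ¬ (mid1 ≤ st.2 ∧ st.2 ≤ mid2) then (st.1 ++ [item], st.2 + 1)
        else (st.1, st.2 + 1)) ([], 0)
    st.1

-- ===== PORT B =====
-- B: no loops — len() and two contiguous slices arr[:(n-1)//2] + arr[n//2+1:]
def remove_middle_alt (arr : List Int) : List Int :=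
  let n : Int := arr.length
  PySem.List.slice arr none (some (PySem.Int.floordiv (n - 1) 2)) ++
  PySem.List.slice arr (some (PySem.Int.floordiv n 2 + 1)) none

-- ===== PRECONDITION & SPEC =====
def Spec_remove_middle (arr : List Int) (out : List Int) : Prop := out = remove_middle_alt arr
instance (arr : List Int) (out : List Int) : Decidable (Spec_remove_middle arr out) := by unfold Spec_remove_middle; infer_instance

-- ===== CLAIM (what is proved, stated in full; the proofs are below) =====
def Claim_equal_remove_middle : Prop := ∀ (arr : List Int), Dom_remove_middle arr → Spec_remove_middle arr (remove_middle arr)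

-- ===== LEMMAS AND PROOFS =====

-- the counting loop computes the length
theorem count_foldl (arr : List Int) (c : Int) :
    arr.foldl (fun l _ => l + 1) c = c + arr.length := by
  induction arr generalizing c with
  | nil => simp
  | cons x xs ih => simp [List.foldl, ih]; ring

-- the index-filter loop is a filter over the enumeration
theorem filter_foldl (arr : List Int) (m1 m2 : Int) (acc : List Int) (i : Int) :
    (arr.foldl (fun (st : List Int × Int) item =>
        if ¬ (m1 ≤ st.2 ∧ st.2 ≤ m2) then (st.1 ++ [item], st.2 + 1)
        else (st.1, st.2 + 1)) (acc, i)).1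
    = acc ++ ((PySem.List.enumerate arr i).filter
        (fun p => decide (¬ (m1 ≤ p.1 ∧ p.1 ≤ m2)))).map (·.2) := by
  induction arr generalizing acc i with
  | nil => simp [PySem.List.enumerate_nil]
  | cons x xs ih =>
    simp only [List.foldl_cons, PySem.List.enumerate_cons, List.filter_cons]
    by_cases h : m1 ≤ i ∧ i ≤ m2
    · rw [if_neg (not_not_intro h), ih, if_neg (by simp [h])]
    · rw [if_pos h, ih, if_pos (by simp [h])]
      simp

-- filtering out the index window [m1, m2] leaves the two outer slices
theorem filter_enum (arr : List Int) (m1 m2 : Nat)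
    (h1 : m1 ≤ m2 + 1) (h2 : m2 + 1 ≤ arr.length) :
    ((PySem.List.enumerate arr 0).filter
        (fun p => decide (¬ ((m1 : Int) ≤ p.1 ∧ p.1 ≤ (m2 : Int))))).map (·.2)
    = arr.take m1 ++ arr.drop (m2 + 1) := by
  have hsplit : arr = arr.take m1 ++ ((arr.drop m1).take (m2 + 1 - m1) ++ arr.drop (m2 + 1)) := by
    have : arr.drop (m2 + 1) = (arr.drop m1).drop (m2 + 1 - m1) := by
      rw [List.drop_drop]; congr 1; omega
    rw [this, List.take_append_drop, List.take_append_drop]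
  have hlen1 : (arr.take m1).length = m1 := by
    rw [List.length_take]; omega
  have hlen2 : ((arr.drop m1).take (m2 + 1 - m1)).length = m2 + 1 - m1 := by
    rw [List.length_take, List.length_drop]; omega
  conv_lhs => rw [hsplit]
  rw [PySem.List.enumerate_append, PySem.List.enumerate_append,
      List.filter_append, List.filter_append, List.map_append, List.map_append]
  have hf1 : (PySem.List.enumerate (arr.take m1) 0).filter
      (fun p => decide (¬ ((m1 : Int) ≤ p.1 ∧ p.1 ≤ (m2 : Int))))
      = PySem.List.enumerate (arr.take m1) 0 := by
    apply List.filter_eq_self.mpr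
    intro p hp
    obtain ⟨k, hk, rfl⟩ := (PySem.List.mem_enumerate_iff _ _ _).mp hp
    simp only [decide_eq_true_iff]
    rw [hlen1] at hk
    omega
  have hf2 : ((PySem.List.enumerate ((arr.drop m1).take (m2 + 1 - m1)) (0 + (arr.take m1).length)).filter
      (fun p => decide (¬ ((m1 : Int) ≤ p.1 ∧ p.1 ≤ (m2 : Int))))) = [] := by
    apply List.filter_eq_nil_iff.mpr
    intro p hp
    obtain ⟨k, hk, rfl⟩ := (PySem.List.mem_enumerate_iff _ _ _).mp hp
    simp only [decide_eq_true_iff, not_not]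
    rw [hlen2] at hk
    rw [hlen1]
    omega
  have hf3 : (PySem.List.enumerate (arr.drop (m2 + 1))
        (0 + (arr.take m1).length + ((arr.drop m1).take (m2 + 1 - m1)).length)).filter
      (fun p => decide (¬ ((m1 : Int) ≤ p.1 ∧ p.1 ≤ (m2 : Int))))
      = PySem.List.enumerate (arr.drop (m2 + 1))
        (0 + (arr.take m1).length + ((arr.drop m1).take (m2 + 1 - m1)).length) := by
    apply List.filter_eq_self.mpr
    intro p hp
    obtain ⟨k, hk, rfl⟩ := (PySem.List.mem_enumerate_iff _ _ _).mp hp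
    simp only [decide_eq_true_iff]
    rw [hlen1, hlen2]
    omega
  rw [hf1, hf2, hf3, PySem.List.map_snd_enumerate, PySem.List.map_snd_enumerate]
  simp

-- B's slices as take/drop on a nonempty list
theorem alt_eq (arr : List Int) (h : arr ≠ []) :
    remove_middle_alt arr
    = arr.take ((arr.length - 1) / 2) ++ arr.drop (arr.length / 2 + 1) := by
  have hL : 1 ≤ arr.length := List.length_pos_iff.mpr h
  unfold remove_middle_alt
  dsimp only
  rw [PySem.Int.floordiv_eq_ediv_of_pos (by norm_num),
      PySem.Int.floordiv_eq_ediv_of_pos (by norm_num),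
      PySem.List.slice_to arr (show (0:Int) ≤ ((arr.length:Int) - 1) / 2 by omega),
      PySem.List.slice_from arr (show (0:Int) ≤ (arr.length:Int) / 2 + 1 by omega)]
  rw [show (((arr.length:Int) - 1) / 2).toNat = (arr.length - 1) / 2 by omega,
      show ((arr.length:Int) / 2 + 1).toNat = arr.length / 2 + 1 by omega]

-- A's loops as take/drop on a nonempty list
theorem a_eq (arr : List Int) (h : arr ≠ []) :
    remove_middle arr
    = arr.take ((arr.length - 1) / 2) ++ arr.drop (arr.length / 2 + 1) := by
  have hL : 1 ≤ arr.length := List.length_pos_iff.mpr h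
  unfold remove_middle
  rw [if_neg h]
  dsimp only
  simp only [count_foldl, zero_add, filter_foldl, List.nil_append]
  rw [PySem.Int.mod_eq_emod_of_pos (by norm_num),
      PySem.Int.floordiv_eq_ediv_of_pos (by norm_num)]
  by_cases hodd : ((arr.length : Int)) % 2 = 1
  · rw [if_pos hodd]
    have hcast : ((arr.length : Int)) / 2 = ((arr.length / 2 : Nat) : Int) := by omega
    rw [hcast, filter_enum arr (arr.length / 2) (arr.length / 2) (by omega) (by omega)]
    congr 2
    omega
  · rw [if_neg hodd]
    have h2 : 2 ≤ arr.length := by omega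
    have hcast1 : ((arr.length : Int)) / 2 - 1 = ((arr.length / 2 - 1 : Nat) : Int) := by omega
    have hcast2 : ((arr.length : Int)) / 2 = ((arr.length / 2 : Nat) : Int) := by omega
    rw [hcast1, hcast2,
        filter_enum arr (arr.length / 2 - 1) (arr.length / 2) (by omega) (by omega)]
    congr 2
    omega

-- ===== VERDICT (by name: the statement is the Claim_ definition above) =====
theorem remove_middle_spec : Claim_equal_remove_middle := by
  intro arr _
  unfold Spec_remove_middle
  by_cases h : arr = []
  · subst h; rfl
  · rw [a_eq arr h, alt_eq arr h]
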